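-- pv_equiv track=rewrite | github.com/Durman/BuildingNodes | __init__.py | bl_sort_str
-- ===== SOURCE A (Python) =====
-- def bl_sort_str(str1: str, str2: str) -> int:
--     """BLender sorts objects names differently compare to the sorted Python function
--     https://developer.blender.org/diffusion/B/browse/master/source/blender/blenlib/intern/string.c;5f59bf00444bf310d0ad0dd20039839912af5122$882
--
--     >>> sorted(['Obj.2', 'Obj 3', 'Obj.1', 'Obj 4', 'Obj', 'obj'], key=cmp_to_key(bl_sort_str))
--     ['Obj', 'Obj.1', 'Obj.2', 'Obj 3', 'Obj 4', 'obj']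
--     """
--     for c1, c2 in zip(str1, str2):
--         if c1 == c2:
--             continue
--         elif c1 == '.':
--             return -1
--         elif c2 == '.':
--             return 1
--         elif c1 < c2:
--             return -1
--         elif c1 > c2:
--             return 1
--
--     if len(str1) > len(str2):
--         return 1
--     elif len(str1) < len(str2):
--         return -1
--     else:
--         return 0
-- ===== SOURCE B (Python) =====
-- def bl_sort_str(str1: str, str2: str) -> int:
--     """Key-based Blender name comparison: '.' sorts before everything else."""
--     k1 = [(0,) if c == '.' else (1, c) for c in str1]
--     k2 = [(0,) if c == '.' else (1, c) for c in str2]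
--     return (k1 > k2) - (k1 < k2)
-- ===== Notes on version B (the rewrite author's own statement) =====
-- stated objective: idiomatic
-- what changed: Replaces the per-character branch cascade plus trailing length comparison by mapping each string to per-character sort keys ((0,) for '.', (1,c) otherwise) and returning a single three-way list comparison.
import Mathlib
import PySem

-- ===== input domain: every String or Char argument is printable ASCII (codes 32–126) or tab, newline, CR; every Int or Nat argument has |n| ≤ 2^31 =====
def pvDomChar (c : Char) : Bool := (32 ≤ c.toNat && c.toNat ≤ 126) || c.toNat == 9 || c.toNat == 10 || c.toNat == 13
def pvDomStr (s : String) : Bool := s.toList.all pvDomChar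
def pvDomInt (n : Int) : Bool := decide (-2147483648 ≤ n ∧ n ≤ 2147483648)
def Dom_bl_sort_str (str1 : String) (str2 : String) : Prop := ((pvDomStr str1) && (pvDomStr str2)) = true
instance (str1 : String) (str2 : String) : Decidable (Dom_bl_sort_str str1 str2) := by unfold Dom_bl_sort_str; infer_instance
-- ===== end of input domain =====

-- B replaces A's in-loop branch cascade + trailing length comparison by per-character
-- sort keys and one lexicographic three-way list comparison (objective: idiomatic).

-- ===== PORT A =====
-- the 'for c1, c2 in zip(str1, str2)' loop: some r = early return, none = loop finished
def pvALoop : List (Char × Char) → Option Int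
  | [] => none
  | (c1, c2) :: t =>
    if c1 = c2 then pvALoop t
    else if c1 = '.' then some (-1)
    else if c2 = '.' then some 1
    else if c1 < c2 then some (-1)
    else if c2 < c1 then some 1
    else pvALoop t

def bl_sort_str (str1 : String) (str2 : String) : Int :=
  match pvALoop (str1.toList.zip str2.toList) with
  | some r => r
  | none =>
    if str1.toList.length > str2.toList.length then 1
    else if str1.toList.length < str2.toList.length then -1
    else 0

-- ===== PORT B =====
-- key of one character: (0,) for '.' → none, (1,c) otherwise → some c
def pvKey (c : Char) : Option Char := if c = '.' then none else some c

-- Python tuple order on keys: (0,) < (1,c); (1,c) < (1,c') iff c < c'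
def pvKeyLt : Option Char → Option Char → Bool
  | none, some _ => true
  | some c, some c' => c < c'
  | _, _ => false

-- Python list three-way comparison (k1 > k2) - (k1 < k2), lexicographic
def pvLexCmp : List (Option Char) → List (Option Char) → Int
  | [], [] => 0
  | [], _ :: _ => -1
  | _ :: _, [] => 1
  | a :: t1, b :: t2 =>
    if a = b then pvLexCmp t1 t2
    else if pvKeyLt a b then -1 else 1

def bl_sort_str_alt (str1 : String) (str2 : String) : Int :=
  pvLexCmp (str1.toList.map pvKey) (str2.toList.map pvKey)

-- ===== PRECONDITION & SPEC =====
def Spec_bl_sort_str (str1 : String) (str2 : String) (out : Int) : Prop := out = bl_sort_str_alt str1 str2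
instance (str1 : String) (str2 : String) (out : Int) : Decidable (Spec_bl_sort_str str1 str2 out) := by unfold Spec_bl_sort_str; infer_instance

-- ===== CLAIM (what is proved, stated in full; the proofs are below) =====
def Claim_equal_bl_sort_str : Prop := ∀ (str1 : String) (str2 : String), Dom_bl_sort_str str1 str2 → Spec_bl_sort_str str1 str2 (bl_sort_str str1 str2)

-- ===== LEMMAS AND PROOFS =====

-- A's whole computation, expressed on the character lists
def pvARes (l1 l2 : List Char) : Int :=
  match pvALoop (l1.zip l2) with
  | some r => r
  | none =>
    if l1.length > l2.length then 1
    else if l1.length < l2.length then -1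
    else 0

theorem pvKey_inj (c1 c2 : Char) : pvKey c1 = pvKey c2 ↔ c1 = c2 := by
  unfold pvKey
  by_cases h1 : c1 = '.' <;> by_cases h2 : c2 = '.' <;>
    simp_all [eq_comm]

theorem pvARes_eq (l1 : List Char) : ∀ l2, pvARes l1 l2 = pvLexCmp (l1.map pvKey) (l2.map pvKey) := by
  induction l1 with
  | nil =>
    intro l2
    cases l2 <;> simp [pvARes, pvALoop, pvLexCmp, List.zip]
  | cons c1 t1 ih =>
    intro l2
    cases l2 with
    | nil => simp [pvARes, pvALoop, pvLexCmp, List.zip]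
    | cons c2 t2 =>
      by_cases hc : c1 = c2
      · have hk : pvKey c1 = pvKey c2 := (pvKey_inj c1 c2).mpr hc
        have : pvARes (c1 :: t1) (c2 :: t2) = pvARes t1 t2 := by
          simp [pvARes, pvALoop, hc]
        rw [this, ih t2]
        simp [pvLexCmp, hk]
      · have hk : pvKey c1 ≠ pvKey c2 := fun h => hc ((pvKey_inj c1 c2).mp h)
        by_cases h1 : c1 = '.'
        · have h2 : c2 ≠ '.' := fun h => hc (h1.trans h.symm)
          simp [pvARes, pvALoop, pvLexCmp, h1, h2, Ne.symm h2, pvKey, pvKeyLt]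
        · by_cases h2 : c2 = '.'
          · simp [pvARes, pvALoop, pvLexCmp, h1, h2, pvKey, pvKeyLt]
          · by_cases hlt : c1 < c2
            · simp [pvARes, pvALoop, pvLexCmp, hc, h1, h2, pvKey, pvKeyLt, hlt]
            · have hgt : c2 < c1 := by
                rcases lt_trichotomy c1 c2 with h | h | h
                · exact (hlt h).elim
                · exact (hc h).elim
                · exact h
              simp [pvARes, pvALoop, pvLexCmp, hc, h1, h2, pvKey, pvKeyLt, hlt, hgt]

-- ===== VERDICT (by name: the statement is the Claim_ definition above) =====
theorem bl_sort_str_spec : Claim_equal_bl_sort_str := by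
  intro str1 str2 _
  show bl_sort_str str1 str2 = bl_sort_str_alt str1 str2
  have := pvARes_eq str1.toList str2.toList
  simpa [pvARes, bl_sort_str, bl_sort_str_alt] using this
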